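-- pv_equiv track=rewrite | github.com/TaegyunB/Algorithm | 프로그래머스/0/181893. 배열 조각하기/배열 조각하기.py | solution
-- ===== SOURCE A (Python) =====
-- def solution(arr, query):
--     answer = arr
--
--     for i in range(len(query)):
--         if i % 2 == 0:
--             del arr[query[i]+1:]
--             answer = arr
--         else:
--             del arr[:query[i]]
--             answer = arr
--
--     return answer
-- ===== SOURCE B (Python) =====
-- def solution(arr, query):
--     # Alternative: tracks window offsets over the original array; one final slice.
--     # Note: unlike the original, this does not mutate arr in place.
--     lo, hi = 0, len(arr)
--     for i, q in enumerate(query):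
--         n = hi - lo
--         if i % 2 == 0:
--             k = q + 1
--         else:
--             k = q
--         if k < 0:
--             k += n
--         k = min(max(k, 0), n)
--         if i % 2 == 0:
--             hi = lo + k
--         else:
--             lo = lo + k
--     return arr[lo:hi]
-- ===== Notes on version B (the rewrite author's own statement) =====
-- stated objective: alternative
-- what changed: Instead of repeatedly deleting from the list per query, B keeps two integer window offsets (lo,hi) over the original array, updates them per query with Python's slice-clamping arithmetic, and takes one final slice.
import Mathlib
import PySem

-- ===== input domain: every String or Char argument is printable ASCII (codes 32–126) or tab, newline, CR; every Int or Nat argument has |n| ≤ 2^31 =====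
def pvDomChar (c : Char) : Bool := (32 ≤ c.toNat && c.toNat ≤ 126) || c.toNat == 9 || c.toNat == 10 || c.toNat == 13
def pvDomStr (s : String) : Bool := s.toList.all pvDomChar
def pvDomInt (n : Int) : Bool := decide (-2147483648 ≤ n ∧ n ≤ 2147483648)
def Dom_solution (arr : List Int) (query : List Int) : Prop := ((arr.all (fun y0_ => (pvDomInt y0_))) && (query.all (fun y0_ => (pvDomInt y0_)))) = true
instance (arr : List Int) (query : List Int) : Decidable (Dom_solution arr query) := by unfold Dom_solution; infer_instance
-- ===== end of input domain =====

-- B keeps two window offsets over the original array instead of A's repeated list truncation, and takes one final slice.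
-- A mutates its `arr` argument in place (observable by the caller); B does not — the equivalence proved here is about the return value.

-- ===== PORT A =====
-- loop 'for i in range(len(query))' with arr truncated by slice deletion:
-- del arr[q+1:]  ==  arr = arr[:q+1];   del arr[:q]  ==  arr = arr[q:]
def solLoopA : List Int → Nat → List Int → List Int
  | [], _, s => s
  | q :: qs, i, s =>
      solLoopA qs (i + 1)
        (if i % 2 == 0 then PySem.List.slice s none (some (q + 1))
         else PySem.List.slice s (some q) none)

def solution (arr : List Int) (query : List Int) : List Int :=
  solLoopA query 0 arr

-- ===== PORT B =====
-- Python slice-bound clamping done by Source B by hand: if k<0: k+=n; k = min(max(k,0),n)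
def pyClamp (n k : Int) : Int :=
  min (max (if k < 0 then k + n else k) 0) n

def solLoopB : List Int → Nat → Int → Int → Int × Int
  | [], _, lo, hi => (lo, hi)
  | q :: qs, i, lo, hi =>
      let n := hi - lo
      if i % 2 == 0 then solLoopB qs (i + 1) lo (lo + pyClamp n (q + 1))
      else solLoopB qs (i + 1) (lo + pyClamp n q) hi

def solution_alt (arr : List Int) (query : List Int) : List Int :=
  PySem.List.slice arr (some (solLoopB query 0 0 (arr.length : Int)).1)
    (some (solLoopB query 0 0 (arr.length : Int)).2)

-- ===== PRECONDITION & SPEC =====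
def Spec_solution (arr : List Int) (query : List Int) (out : List Int) : Prop := out = solution_alt arr query
instance (arr : List Int) (query : List Int) (out : List Int) : Decidable (Spec_solution arr query out) := by unfold Spec_solution; infer_instance

-- ===== CLAIM (what is proved, stated in full; the proofs are below) =====
def Claim_equal_solution : Prop := ∀ (arr : List Int) (query : List Int), Dom_solution arr query → Spec_solution arr query (solution arr query)

-- ===== LEMMAS AND PROOFS =====

-- pyClamp's value coincides with PySem's slice-index clamping, and stays within [0, n].
theorem pyClamp_nonneg (n k : Int) (hn : 0 ≤ n) : 0 ≤ pyClamp n k := by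
  unfold pyClamp; simp only [min_def, max_def]; split_ifs <;> omega

theorem pyClamp_le (n k : Int) (hn : 0 ≤ n) : pyClamp n k ≤ n := by
  unfold pyClamp; simp only [min_def, max_def]; split_ifs <;> omega

theorem pyClamp_toNat (n k : Int) (hn : 0 ≤ n) :
    (pyClamp n k).toNat = PySem.List.clampIdx n.toNat k := by
  unfold pyClamp PySem.List.clampIdx
  simp only [min_def, max_def]
  split_ifs <;> omega

-- slicing from the front / up to a bound, as drop/take with clampIdx
theorem slice_none_some (xs : List Int) (b : Int) :
    PySem.List.slice xs none (some b) = xs.take (PySem.List.clampIdx xs.length b) := by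
  simp [PySem.List.slice]

-- Main invariant: running A's truncation loop on the window (arr.drop lo).take (hi-lo)
-- equals the window described by B's offset loop.
theorem loop_invariant (qs : List Int) (i : Nat) (lo hi : Int) (arr : List Int)
    (h0 : 0 ≤ lo) (h1 : lo ≤ hi) (h2 : hi ≤ (arr.length : Int)) :
    solLoopA qs i ((arr.drop lo.toNat).take (hi - lo).toNat) =
      (arr.drop (solLoopB qs i lo hi).1.toNat).take
        ((solLoopB qs i lo hi).2 - (solLoopB qs i lo hi).1).toNat := by
  induction qs generalizing i lo hi with
  | nil => simp [solLoopA, solLoopB]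
  | cons q qs ih =>
    have hlen : ((arr.drop lo.toNat).take (hi - lo).toNat).length = (hi - lo).toNat := by
      simp [List.length_take, List.length_drop]; omega
    by_cases hpar : i % 2 == 0
    · have hc0 := pyClamp_nonneg (hi - lo) (q + 1) (by omega)
      have hc1 := pyClamp_le (hi - lo) (q + 1) (by omega)
      simp only [solLoopA, solLoopB, hpar, if_true]
      rw [slice_none_some, hlen, ← pyClamp_toNat (hi - lo) (q + 1) (by omega),
          List.take_take]
      have htn : min (pyClamp (hi - lo) (q + 1)).toNat (hi - lo).toNat
          = ((lo + pyClamp (hi - lo) (q + 1)) - lo).toNat := by omega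
      rw [htn]
      exact ih (i + 1) lo (lo + pyClamp (hi - lo) (q + 1)) h0 (by omega) (by omega)
    · have hc0 := pyClamp_nonneg (hi - lo) q (by omega)
      have hc1 := pyClamp_le (hi - lo) q (by omega)
      simp only [solLoopA, solLoopB, hpar, if_neg, Bool.not_eq_true]
      rw [PySem.List.slice_some_none, hlen, ← pyClamp_toNat (hi - lo) q (by omega),
          List.drop_take, List.drop_drop]
      have h3 : lo.toNat + (pyClamp (hi - lo) q).toNat = (lo + pyClamp (hi - lo) q).toNat := by
        omega
      have h4 : (hi - lo).toNat - (pyClamp (hi - lo) q).toNat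
          = (hi - (lo + pyClamp (hi - lo) q)).toNat := by omega
      rw [h3, h4]
      exact ih (i + 1) (lo + pyClamp (hi - lo) q) hi (by omega) (by omega) h2

-- B's offsets stay within [0, arr.length] and ordered.
theorem loopB_bounds (qs : List Int) (i : Nat) (lo hi : Int)
    (h0 : 0 ≤ lo) (h1 : lo ≤ hi) :
    0 ≤ (solLoopB qs i lo hi).1 ∧ (solLoopB qs i lo hi).1 ≤ (solLoopB qs i lo hi).2 ∧
      (solLoopB qs i lo hi).2 ≤ hi := by
  induction qs generalizing i lo hi with
  | nil => simp [solLoopB]; omega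
  | cons q qs ih =>
    by_cases hpar : i % 2 == 0
    · have hc0 := pyClamp_nonneg (hi - lo) (q + 1) (by omega)
      have hc1 := pyClamp_le (hi - lo) (q + 1) (by omega)
      simp only [solLoopB, hpar, if_true]
      have := ih (i + 1) lo (lo + pyClamp (hi - lo) (q + 1)) h0 (by omega)
      exact ⟨this.1, this.2.1, by omega⟩
    · have hc0 := pyClamp_nonneg (hi - lo) q (by omega)
      have hc1 := pyClamp_le (hi - lo) q (by omega)
      simp only [solLoopB, hpar, if_neg, Bool.not_eq_true]
      exact ih (i + 1) (lo + pyClamp (hi - lo) q) hi (by omega) (by omega)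

theorem solution_spec : Claim_equal_solution := by
  intro arr query _
  unfold Spec_solution solution solution_alt
  have hb := loopB_bounds query 0 0 (arr.length : Int) le_rfl (by positivity)
  have hinv := loop_invariant query 0 0 (arr.length : Int) arr le_rfl
    (by positivity) le_rfl
  have hstart : (arr.drop (0 : Int).toNat).take (((arr.length : Int) - 0)).toNat = arr := by
    simp
  rw [hstart] at hinv
  rw [hinv]
  set p := solLoopB query 0 0 (arr.length : Int) with hp
  rw [PySem.List.slice_toNat arr hb.1 (by omega : (0:Int) ≤ p.2)]
  congr 1
  omega
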